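-- pv_equiv track=rewrite | github.com/cqh6666/my_lab | p_look/P1_data_string_to_list_process.py | lab_med_process
-- ===== SOURCE A (Python) =====
-- def lab_med_process(data):
--     first_split = data.split('_')
--     second_split = [first_split[i].split(':') for i in range(len(first_split))]
--     third_split = [[second_split[i][j].split(';') for j in range(len(second_split[i]))] for i in
--                    range(len(second_split))]
--     fourth_split = [
--         [[third_split[i][j][k].split(',') for k in range(len(third_split[i][j]))] for j in range(len(third_split[i]))]
--         for i in range(len(third_split))]
--     return fourth_split
-- ===== SOURCE B (Python) =====
-- def lab_med_process(data):
--     # B: one recursive helper threading the delimiter list replaces A's four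
--     # hand-unrolled index-based nested comprehensions (simpler decomposition).
--     def rec(s, delims):
--         if not delims:
--             return s
--         return [rec(part, delims[1:]) for part in s.split(delims[0])]
--     return rec(data, ['_', ':', ';', ','])
-- ===== Notes on version B (the rewrite author's own statement) =====
-- stated objective: simpler
-- what changed: A's four hand-unrolled index-based nested list comprehensions (range(len(...)) indexing at each depth) are replaced by one recursive helper that threads the delimiter list ['_',':',';',','], splitting on the head delimiter and recursing on the tail for each part.
import Mathlib
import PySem

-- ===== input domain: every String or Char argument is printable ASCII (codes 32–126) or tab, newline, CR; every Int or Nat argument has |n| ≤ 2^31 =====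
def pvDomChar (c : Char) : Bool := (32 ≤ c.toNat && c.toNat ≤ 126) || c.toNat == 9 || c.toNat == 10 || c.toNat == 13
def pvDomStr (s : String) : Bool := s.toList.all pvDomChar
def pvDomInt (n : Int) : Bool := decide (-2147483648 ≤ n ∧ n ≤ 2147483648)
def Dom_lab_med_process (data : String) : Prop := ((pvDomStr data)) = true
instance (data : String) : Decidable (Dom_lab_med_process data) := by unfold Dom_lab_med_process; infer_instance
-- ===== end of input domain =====

-- B replaces A's four hand-unrolled index-based nested comprehensions by one
-- generic "split on a delimiter, map the rest" helper composed along the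
-- delimiter list ['_', ':', ';', ','] (objective: simpler decomposition).

-- ===== PORT A =====
def lab_med_process (data : String) : List (List (List (List String))) :=
  let first_split := (PySem.Str.split? data "_").getD []
  let second_split := (PySem.List.pyRange 0 (first_split.length : Int) 1).map
    (fun i => (PySem.Str.split? (PySem.List.pyGetD first_split i "") ":").getD [])
  let third_split := (PySem.List.pyRange 0 (second_split.length : Int) 1).map
    (fun i => (PySem.List.pyRange 0 ((PySem.List.pyGetD second_split i []).length : Int) 1).map
      (fun j => (PySem.Str.split? (PySem.List.pyGetD (PySem.List.pyGetD second_split i []) j "") ";").getD []))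
  let fourth_split := (PySem.List.pyRange 0 (third_split.length : Int) 1).map
    (fun i => (PySem.List.pyRange 0 ((PySem.List.pyGetD third_split i []).length : Int) 1).map
      (fun j => (PySem.List.pyRange 0 ((PySem.List.pyGetD (PySem.List.pyGetD third_split i []) j []).length : Int) 1).map
        (fun k => (PySem.Str.split?
          (PySem.List.pyGetD (PySem.List.pyGetD (PySem.List.pyGetD third_split i []) j []) k "") ",").getD [])))
  fourth_split

-- ===== PORT B =====
-- rec(s, d :: rest) = [rec(part, rest) for part in s.split(d)]; the fixed
-- 4-element delimiter list makes the recursion a composition of one helper.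
def pvSplitMap {α : Type} (d : String) (f : String → α) (s : String) : List α :=
  ((PySem.Str.split? s d).getD []).map f

def lab_med_process_alt (data : String) : List (List (List (List String))) :=
  pvSplitMap "_" (pvSplitMap ":" (pvSplitMap ";" (pvSplitMap "," id))) data

-- ===== PRECONDITION & SPEC =====
def Spec_lab_med_process (data : String) (out : List (List (List (List String)))) : Prop := out = lab_med_process_alt data
instance (data : String) (out : List (List (List (List String)))) : Decidable (Spec_lab_med_process data out) := by unfold Spec_lab_med_process; infer_instance

-- ===== CLAIM (what is proved, stated in full; the proofs are below) =====
def Claim_equal_lab_med_process : Prop := ∀ (data : String), Dom_lab_med_process data → Spec_lab_med_process data (lab_med_process data)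

-- ===== LEMMAS AND PROOFS =====

-- '[f(xs[i]) for i in range(len(xs))]' is 'xs.map f'.
theorem pv_map_range_index {A B : Type} (xs : List A) (f : A -> B) (d : A) :
    (PySem.List.pyRange 0 (xs.length : Int) 1).map (fun i => f (PySem.List.pyGetD xs i d)) = xs.map f := by
  have h : (PySem.List.pyRange 0 (xs.length : Int) 1).map (fun i => PySem.List.pyGetD xs i d) = xs :=
    PySem.List.map_pyGetD_pyRange_zero xs d
  calc (PySem.List.pyRange 0 (xs.length : Int) 1).map (fun i => f (PySem.List.pyGetD xs i d))
      = ((PySem.List.pyRange 0 (xs.length : Int) 1).map (fun i => PySem.List.pyGetD xs i d)).map f := by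
        rw [List.map_map]; rfl
    _ = xs.map f := by rw [h]

-- the three inner split-then-map stages of A, as plain functions (proof-only helpers)
def pvG4 (w : String) : List String := (PySem.Str.split? w ",").getD []
def pvG (v : List String) : List (List String) :=
  (PySem.List.pyRange 0 (v.length : Int) 1).map
    (fun k => (PySem.Str.split? (PySem.List.pyGetD v k "") ",").getD [])
def pvF (t : List (List String)) : List (List (List String)) :=
  (PySem.List.pyRange 0 (t.length : Int) 1).map
    (fun j => pvG (PySem.List.pyGetD t j []))
def pvG2 (t : String) : List String := (PySem.Str.split? t ";").getD []
def pvF2 (t : List String) : List (List String) :=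
  (PySem.List.pyRange 0 (t.length : Int) 1).map
    (fun j => (PySem.Str.split? (PySem.List.pyGetD t j "") ";").getD [])
def pvG1 (s : String) : List String := (PySem.Str.split? s ":").getD []

theorem pvG_eq (v : List String) : pvG v = v.map pvG4 :=
  pv_map_range_index v pvG4 ""
theorem pvF_eq (t : List (List String)) : pvF t = t.map pvG :=
  pv_map_range_index t pvG []
theorem pvF2_eq (t : List String) : pvF2 t = t.map pvG2 :=
  pv_map_range_index t pvG2 ""

-- ===== VERDICT (by name: the statement is the Claim_ definition above) =====
theorem lab_med_process_spec : Claim_equal_lab_med_process := by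
  intro data _
  show lab_med_process data = lab_med_process_alt data
  unfold lab_med_process lab_med_process_alt pvSplitMap
  set fs := (PySem.Str.split? data "_").getD [] with hfs
  calc (PySem.List.pyRange 0 ((((PySem.List.pyRange 0 ((((PySem.List.pyRange 0 ((fs.length : Int)) 1).map
              (fun i => (PySem.Str.split? (PySem.List.pyGetD fs i "") ":").getD [])).length : Int)) 1).map
              (fun i => pvF2 (PySem.List.pyGetD ((PySem.List.pyRange 0 ((fs.length : Int)) 1).map
                  (fun i => (PySem.Str.split? (PySem.List.pyGetD fs i "") ":").getD [])) i []))).length : Int)) 1).map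
          (fun i => pvF (PySem.List.pyGetD ((PySem.List.pyRange 0 ((((PySem.List.pyRange 0 ((fs.length : Int)) 1).map
              (fun i => (PySem.Str.split? (PySem.List.pyGetD fs i "") ":").getD [])).length : Int)) 1).map
              (fun i => pvF2 (PySem.List.pyGetD ((PySem.List.pyRange 0 ((fs.length : Int)) 1).map
                  (fun i => (PySem.Str.split? (PySem.List.pyGetD fs i "") ":").getD [])) i []))) i []))
      = ((PySem.List.pyRange 0 ((((PySem.List.pyRange 0 ((fs.length : Int)) 1).map
              (fun i => pvG1 (PySem.List.pyGetD fs i ""))).length : Int)) 1).map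
          (fun i => pvF2 (PySem.List.pyGetD ((PySem.List.pyRange 0 ((fs.length : Int)) 1).map
              (fun i => pvG1 (PySem.List.pyGetD fs i ""))) i []))).map pvF := by
        exact pv_map_range_index _ pvF []
    _ = (((PySem.List.pyRange 0 ((fs.length : Int)) 1).map
          (fun i => pvG1 (PySem.List.pyGetD fs i ""))).map pvF2).map pvF := by
        rw [pv_map_range_index _ pvF2 []]
    _ = ((fs.map pvG1).map pvF2).map pvF := by
        rw [pv_map_range_index fs pvG1 ""]
    _ = fs.map (fun s => pvF (pvF2 (pvG1 s))) := by
        simp [List.map_map, Function.comp]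
    _ = fs.map (fun s => ((PySem.Str.split? s ":").getD []).map (fun t =>
          ((PySem.Str.split? t ";").getD []).map (fun u =>
            List.map id ((PySem.Str.split? u ",").getD [])))) := by
        refine List.map_congr_left (fun s _ => ?_)
        rw [pvF2_eq, pvF_eq, List.map_map]
        refine List.map_congr_left (fun t _ => ?_)
        show pvG (pvG2 t) = _
        rw [pvG_eq]
        simp [pvG2, pvG4]
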